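-- pv_equiv track=rewrite | github.com/Hanliang-Xu/Hanliang-Xu.github.io | backend/utils/file_handler.py | analyze_volume_types
-- ===== SOURCE A (Python) =====
-- def analyze_volume_types(volume_types):
--   first_non_m0type = next((vt for vt in volume_types if vt in {'control', 'label', 'deltam'}), None)
--   pattern = "pattern error"
--   control_label_pairs = 0
--   label_control_pairs = 0
--
--   if first_non_m0type == 'control':
--     pattern = 'control-label'
--   elif first_non_m0type == 'label':
--     pattern = 'label-control'
--   elif first_non_m0type == 'deltam':
--     pattern = 'deltam'
--     deltam_count = volume_types.count('deltam')
--     return pattern, deltam_count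
--   i = 0
--   while i < len(volume_types):
--     if volume_types[i] == 'control' and i + 1 < len(volume_types) and volume_types[
--       i + 1] == 'label':
--       control_label_pairs += 1
--       i += 2
--     elif volume_types[i] == 'label' and i + 1 < len(volume_types) and volume_types[
--       i + 1] == 'control':
--       label_control_pairs += 1
--       i += 2
--     else:
--       i += 1
--   if pattern == 'control-label':
--     return pattern, control_label_pairs
--   else:
--     return pattern, label_control_pairs
-- ===== SOURCE B (Python) =====
-- def analyze_volume_types(volume_types):
--   first = next((vt for vt in volume_types if vt in {'control', 'label', 'deltam'}), None)
--   if first == 'deltam':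
--     return 'deltam', volume_types.count('deltam')
--   cl = 0
--   lc = 0
--   pending = ''
--   for vt in volume_types:
--     ch = 'c' if vt == 'control' else 'l' if vt == 'label' else 'x'
--     if pending + ch == 'cl':
--       cl += 1
--       pending = ''
--     elif pending + ch == 'lc':
--       lc += 1
--       pending = ''
--     else:
--       pending = ch
--   if first == 'control':
--     return 'control-label', cl
--   pattern = 'label-control' if first == 'label' else 'pattern error'
--   return pattern, lc
-- ===== Notes on version B (the rewrite author's own statement) =====
-- stated objective: alternative
-- what changed: The index-jumping while loop (i+=2 on a pair, i+=1 otherwise, with lookahead volume_types[i+1]) is replaced by a single streaming fold over the list that keeps one pending abbreviated character and counts a pair whenever pending+current forms 'cl' or 'lc'; no indexing or lookahead is used.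
import Mathlib
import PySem

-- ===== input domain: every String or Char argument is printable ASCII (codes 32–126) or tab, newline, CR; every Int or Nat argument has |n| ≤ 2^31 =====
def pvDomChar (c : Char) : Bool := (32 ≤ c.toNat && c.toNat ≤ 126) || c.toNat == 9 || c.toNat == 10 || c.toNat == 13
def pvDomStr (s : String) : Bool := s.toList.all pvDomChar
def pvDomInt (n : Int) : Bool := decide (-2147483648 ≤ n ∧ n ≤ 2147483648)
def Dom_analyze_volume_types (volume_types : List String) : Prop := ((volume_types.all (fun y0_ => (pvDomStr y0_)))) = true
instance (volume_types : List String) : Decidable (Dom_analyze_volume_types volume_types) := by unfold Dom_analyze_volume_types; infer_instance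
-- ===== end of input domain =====

-- B replaces A's index-jumping pair scan by a single streaming fold with a pending character (alternative decomposition, same O(n) cost).


-- ===== PORT A =====
-- the while loop: i jumps by 2 on a matched pair, by 1 otherwise; state (control_label_pairs, label_control_pairs)
def pvLoopA (vts : List String) (i : Nat) (cl lc : Int) : Int × Int :=
  if _h : i < vts.length then
    if vts.getD i "" == "control" && decide (i + 1 < vts.length) && vts.getD (i+1) "" == "label" then
      pvLoopA vts (i+2) (cl+1) lc
    else if vts.getD i "" == "label" && decide (i + 1 < vts.length) && vts.getD (i+1) "" == "control" then
      pvLoopA vts (i+2) cl (lc+1)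
    else
      pvLoopA vts (i+1) cl lc
  else (cl, lc)
termination_by vts.length - i

def analyze_volume_types (volume_types : List String) : String × Int :=
  let first := volume_types.find? (fun vt => vt == "control" || vt == "label" || vt == "deltam")
  if first == some "deltam" then
    ("deltam", (volume_types.count "deltam" : Int))
  else
    let pattern := if first == some "control" then "control-label"
                   else if first == some "label" then "label-control"
                   else "pattern error"
    let r := pvLoopA volume_types 0 0 0
    if pattern == "control-label" then (pattern, r.1) else (pattern, r.2)

-- ===== PORT B =====
-- one streaming step: pending abbreviated char (none = '') plus the two counters
def pvStepB (st : Option Char × Int × Int) (vt : String) : Option Char × Int × Int :=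
  let ch := if vt == "control" then 'c' else if vt == "label" then 'l' else 'x'
  match st with
  | (some p, cl, lc) =>
      if p == 'c' && ch == 'l' then (none, cl + 1, lc)
      else if p == 'l' && ch == 'c' then (none, cl, lc + 1)
      else (some ch, cl, lc)
  | (none, cl, lc) => (some ch, cl, lc)

def analyze_volume_types_alt (volume_types : List String) : String × Int :=
  let first := volume_types.find? (fun vt => vt == "control" || vt == "label" || vt == "deltam")
  if first == some "deltam" then
    ("deltam", (volume_types.count "deltam" : Int))
  else
    let st := volume_types.foldl pvStepB (none, 0, 0)
    if first == some "control" then ("control-label", st.2.1)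
    else
      let pattern := if first == some "label" then "label-control" else "pattern error"
      (pattern, st.2.2)

-- ===== PRECONDITION & SPEC =====
def Spec_analyze_volume_types (volume_types : List String) (out : String × Int) : Prop := out = analyze_volume_types_alt volume_types
instance (volume_types : List String) (out : String × Int) : Decidable (Spec_analyze_volume_types volume_types out) := by unfold Spec_analyze_volume_types; infer_instance

-- ===== CLAIM (what is proved, stated in full; the proofs are below) =====
def Claim_equal_analyze_volume_types : Prop := ∀ (volume_types : List String), Dom_analyze_volume_types volume_types → Spec_analyze_volume_types volume_types (analyze_volume_types volume_types)

-- ===== LEMMAS AND PROOFS =====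

-- core correspondence: A's index loop from i equals B's fold over the suffix with empty pending
theorem pvLoopA_eq_fold (vts : List String) (i : Nat) (cl lc : Int) :
    pvLoopA vts i cl lc = ((vts.drop i).foldl pvStepB (none, cl, lc)).2 := by
  fun_induction pvLoopA vts i cl lc with
  | case1 i cl lc h h1 ih =>
      simp only [Bool.and_eq_true, beq_iff_eq, decide_eq_true_eq] at h1
      obtain ⟨⟨hx, hlt⟩, hy⟩ := h1
      rw [List.getD_eq_getElem vts "" h] at hx
      rw [List.getD_eq_getElem vts "" hlt] at hy
      rw [List.drop_eq_getElem_cons h, List.drop_eq_getElem_cons hlt]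
      simp [List.foldl, pvStepB, hx, hy, ih]
  | case2 i cl lc h h1 h2 ih =>
      simp only [Bool.and_eq_true, beq_iff_eq, decide_eq_true_eq] at h2
      obtain ⟨⟨hx, hlt⟩, hy⟩ := h2
      rw [List.getD_eq_getElem vts "" h] at hx
      rw [List.getD_eq_getElem vts "" hlt] at hy
      rw [List.drop_eq_getElem_cons h, List.drop_eq_getElem_cons hlt]
      simp [List.foldl, pvStepB, hx, hy, ih]
  | case3 i cl lc h h1 h2 ih =>
      rw [List.drop_eq_getElem_cons h]
      by_cases hlt : i + 1 < vts.length
      · rw [List.drop_eq_getElem_cons hlt] at ih ⊢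
        simp only [Bool.and_eq_true, beq_iff_eq, decide_eq_true_eq, not_and] at h1 h2
        rw [List.getD_eq_getElem vts "" h] at h1 h2
        rw [List.getD_eq_getElem vts "" hlt] at h1 h2
        rw [ih]
        simp only [List.foldl, pvStepB]
        by_cases hx : vts[i] = "control" <;> by_cases hy : vts[i+1] = "control" <;>
          by_cases hx2 : vts[i] = "label" <;> by_cases hy2 : vts[i+1] = "label" <;>
          simp_all
      · have : vts.drop (i+1) = [] := by
          rw [List.drop_eq_nil_iff]; omega
        rw [this] at ih ⊢
        simp [List.foldl, pvStepB, ih]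
  | case4 i cl lc h =>
      rw [List.drop_eq_nil_iff.mpr (by omega : vts.length ≤ i)]
      simp [List.foldl]

theorem analyze_volume_types_spec : Claim_equal_analyze_volume_types := by
  intro vts _
  show analyze_volume_types vts = analyze_volume_types_alt vts
  unfold analyze_volume_types analyze_volume_types_alt
  have hfold := pvLoopA_eq_fold vts 0 0 0
  rw [show vts.drop 0 = vts from rfl] at hfold
  simp only [hfold]
  split_ifs <;> simp_all
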